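-- pv_equiv track=rewrite | github.com/btrif/Python_dev_repo | Project EULER/pb418 Factorisation triples.py | gensubproducts
-- ===== SOURCE A (Python) =====
-- def gensubproducts(factors, top):
--     l = [1]
--     for p in factors:
--         for i in range(len(l)):
--             x = l[i] * p
--             if x < top:
--                 l.append(x)
--             else:
--                 break
--         l.sort()
--         x = 0
--         newl = []
--         for y in l:
--             if x < y:
--                 x = y
--                 newl.append(x)
--         l = newl
--     return l
-- ===== SOURCE B (Python) =====
-- def gensubproducts(factors, top):
--     # One sorted, duplicate-free, all-positive list is maintained; each factor's
--     # products are merged in with a two-pointer merge instead of sort+rescan.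
--     l = [1]
--     for p in factors:
--         if p <= 0:
--             continue  # products would be non-positive and dropped anyway
--         prods = []
--         for v in l:
--             x = v * p
--             if x >= top:
--                 break
--             prods.append(x)
--         l = _merge_dedup(l, prods)
--     return l
--
-- def _merge_dedup(xs, ys):
--     out = []
--     i = j = 0
--     while i < len(xs) and j < len(ys):
--         a, b = xs[i], ys[j]
--         if a < b:
--             out.append(a); i += 1
--         elif b < a:
--             out.append(b); j += 1
--         else:
--             out.append(a); i += 1; j += 1
--     out.extend(xs[i:])
--     out.extend(ys[j:])
--     return out
-- ===== Notes on version B (the rewrite author's own statement) =====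
-- stated objective: faster
-- what changed: Instead of appending products, re-sorting the whole list and rescanning it to dedup on every factor, B keeps the list as an invariant sorted duplicate-free positive run and merges each factor's (already sorted) product prefix in with a single two-pointer merge, skipping non-positive factors whose products are all dropped.
import Mathlib
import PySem

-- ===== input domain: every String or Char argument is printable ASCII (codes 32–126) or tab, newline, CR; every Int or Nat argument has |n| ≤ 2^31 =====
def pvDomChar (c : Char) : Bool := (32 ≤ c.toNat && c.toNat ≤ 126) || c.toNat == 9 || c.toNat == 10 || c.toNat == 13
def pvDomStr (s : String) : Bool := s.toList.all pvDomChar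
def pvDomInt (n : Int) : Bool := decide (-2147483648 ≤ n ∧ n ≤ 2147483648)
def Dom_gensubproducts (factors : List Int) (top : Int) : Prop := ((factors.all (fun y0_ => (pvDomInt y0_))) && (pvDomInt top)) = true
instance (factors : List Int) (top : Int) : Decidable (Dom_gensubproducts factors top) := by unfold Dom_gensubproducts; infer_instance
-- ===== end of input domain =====

-- B replaces A's per-factor sort+rescan-dedup by a single two-pointer merge into an
-- invariantly sorted duplicate-free positive list (faster: O(k*N) vs O(k*N log N)).


-- ===== PORT A =====
-- 'for i in range(len(l)): x = l[i]*p; if x < top: l.append(x) else: break'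
-- range(len(l)) is snapshot before the loop and every index i < len(original l)
-- reads an original element (appends go past them), so the loop is exactly a
-- recursion over the original list's elements while appending to the growing list.
def pvInnerA (p top : Int) : List Int → List Int → List Int
  | [], acc => acc
  | v :: rest, acc =>
      let x := v * p
      if x < top then pvInnerA p top rest (acc ++ [x]) else acc

-- 'x = 0; newl = []; for y in l: if x < y: x = y; newl.append(x)'
def pvDedupScanA : Int → List Int → List Int
  | _, [] => []
  | x, y :: ys => if x < y then y :: pvDedupScanA y ys else pvDedupScanA x ys

def gensubproducts (factors : List Int) (top : Int) : List Int :=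
  factors.foldl (fun l p =>
    let l2 := pvInnerA p top l l
    let l3 := PySem.List.sorted l2 (fun x => x) false
    pvDedupScanA 0 l3) [1]

-- ===== PORT B =====
-- 'prods = []; for v in l: x = v*p; if x >= top: break; prods.append(x)'
def pvProdsB (p top : Int) : List Int → List Int
  | [] => []
  | v :: rest =>
      let x := v * p
      if x ≥ top then [] else x :: pvProdsB p top rest

-- two-pointer merge of two sorted lists, dropping a duplicate when heads are equal
def pvMergeD : List Int → List Int → List Int
  | [], ys => ys
  | xs, [] => xs
  | x :: xs, y :: ys =>
      if x < y then x :: pvMergeD xs (y :: ys)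
      else if y < x then y :: pvMergeD (x :: xs) ys
      else x :: pvMergeD xs ys
termination_by xs ys => xs.length + ys.length

def gensubproducts_alt (factors : List Int) (top : Int) : List Int :=
  factors.foldl (fun l p =>
    if p ≤ 0 then l else pvMergeD l (pvProdsB p top l)) [1]

-- ===== PRECONDITION & SPEC =====
def Spec_gensubproducts (factors : List Int) (top : Int) (out : List Int) : Prop := out = gensubproducts_alt factors top
instance (factors : List Int) (top : Int) (out : List Int) : Decidable (Spec_gensubproducts factors top out) := by unfold Spec_gensubproducts; infer_instance

-- ===== CLAIM (what is proved, stated in full; the proofs are below) =====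
def Claim_equal_gensubproducts : Prop := ∀ (factors : List Int) (top : Int), Dom_gensubproducts factors top → Spec_gensubproducts factors top (gensubproducts factors top)

-- ===== LEMMAS AND PROOFS =====

def pvInv (l : List Int) : Prop := l.Pairwise (· < ·) ∧ ∀ x ∈ l, 0 < x

-- A's inner loop appends exactly B's product prefix
theorem pvInnerA_eq (p top : Int) : ∀ (l acc : List Int),
    pvInnerA p top l acc = acc ++ pvProdsB p top l := by
  intro l
  induction l with
  | nil => intro acc; simp [pvInnerA, pvProdsB]
  | cons v rest ih =>
      intro acc
      simp only [pvInnerA, pvProdsB]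
      by_cases h : v * p < top
      · rw [if_pos h, if_neg (by omega), ih]; simp
      · rw [if_neg h, if_pos (by omega)]; simp

theorem pvProdsB_mem {p top : Int} : ∀ {l : List Int} {x : Int},
    x ∈ pvProdsB p top l → ∃ v ∈ l, x = v * p := by
  intro l
  induction l with
  | nil => intro x h; simp [pvProdsB] at h
  | cons v rest ih =>
      intro x h
      simp only [pvProdsB] at h
      by_cases hb : v * p ≥ top
      · rw [if_pos hb] at h; simp at h
      · rw [if_neg hb] at h
        rcases List.mem_cons.mp h with h | h
        · exact ⟨v, by simp, h⟩
        · obtain ⟨w, hw, hx⟩ := ih h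
          exact ⟨w, by simp [hw], hx⟩

theorem pvProdsB_pairwise {p top : Int} (hp : 0 < p) : ∀ {l : List Int},
    l.Pairwise (· < ·) → (pvProdsB p top l).Pairwise (· < ·) := by
  intro l
  induction l with
  | nil => intro _; simp [pvProdsB]
  | cons v rest ih =>
      intro h
      rw [List.pairwise_cons] at h
      simp only [pvProdsB]
      by_cases hb : v * p ≥ top
      · simp [if_pos hb]
      · rw [if_neg hb]
        refine List.pairwise_cons.mpr ⟨?_, ih h.2⟩
        intro x hx
        obtain ⟨w, hw, rfl⟩ := pvProdsB_mem hx
        exact mul_lt_mul_of_pos_right (h.1 w hw) hp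

theorem pvMergeD_mem : ∀ (xs ys : List Int) (a : Int),
    a ∈ pvMergeD xs ys ↔ a ∈ xs ∨ a ∈ ys := by
  intro xs
  induction xs with
  | nil => intro ys a; simp [pvMergeD]
  | cons x xs ihx =>
      intro ys
      induction ys with
      | nil => intro a; simp [pvMergeD]
      | cons y ys ihy =>
          intro a
          simp only [pvMergeD]
          by_cases h1 : x < y
          · rw [if_pos h1]; simp [ihx]; tauto
          · rw [if_neg h1]
            by_cases h2 : y < x
            · rw [if_pos h2]; simp [ihy]; tauto
            · have hxy : x = y := le_antisymm (not_lt.mp h2) (not_lt.mp h1)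
              rw [if_neg h2]; subst hxy; simp [ihx]; tauto

theorem pvMergeD_pairwise : ∀ (xs ys : List Int),
    xs.Pairwise (· < ·) → ys.Pairwise (· < ·) → (pvMergeD xs ys).Pairwise (· < ·) := by
  intro xs
  induction xs with
  | nil => intro ys _ hy; simpa [pvMergeD] using hy
  | cons x xs ihx =>
      intro ys
      induction ys with
      | nil => intro hx _; simpa [pvMergeD] using hx
      | cons y ys ihy =>
          intro hx hy
          rw [List.pairwise_cons] at hx hy
          simp only [pvMergeD]
          by_cases h1 : x < y
          · rw [if_pos h1]
            refine List.pairwise_cons.mpr ⟨?_, ihx (y :: ys) hx.2 (List.pairwise_cons.mpr hy)⟩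
            intro a ha
            rcases (pvMergeD_mem _ _ _).mp ha with h | h
            · exact hx.1 a h
            · rcases List.mem_cons.mp h with rfl | h
              · exact h1
              · exact lt_trans h1 (hy.1 a h)
          · rw [if_neg h1]
            by_cases h2 : y < x
            · rw [if_pos h2]
              refine List.pairwise_cons.mpr ⟨?_, ihy (List.pairwise_cons.mpr hx) hy.2⟩
              intro a ha
              rcases (pvMergeD_mem _ _ _).mp ha with h | h
              · rcases List.mem_cons.mp h with rfl | h
                · exact h2
                · exact lt_trans h2 (hx.1 a h)
              · exact hy.1 a h
            · have hxy : x = y := le_antisymm (not_lt.mp h2) (not_lt.mp h1)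
              subst hxy
              rw [if_neg h2]
              refine List.pairwise_cons.mpr ⟨?_, ihx ys hx.2 hy.2⟩
              intro a ha
              rcases (pvMergeD_mem _ _ _).mp ha with h | h
              · exact hx.1 a h
              · exact hy.1 a h

theorem pvDedupScanA_spec : ∀ (s : List Int) (a : Int), s.Pairwise (· ≤ ·) →
    (pvDedupScanA a s).Pairwise (· < ·) ∧ ∀ x, x ∈ pvDedupScanA a s ↔ x ∈ s ∧ a < x := by
  intro s
  induction s with
  | nil => intro a _; simp [pvDedupScanA]
  | cons y ys ih =>
      intro a hs
      rw [List.pairwise_cons] at hs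
      simp only [pvDedupScanA]
      by_cases h : a < y
      · rw [if_pos h]
        obtain ⟨hpw, hmem⟩ := ih y hs.2
        constructor
        · refine List.pairwise_cons.mpr ⟨?_, hpw⟩
          intro x hx
          exact ((hmem x).mp hx).2
        · intro x
          constructor
          · intro hx
            rcases List.mem_cons.mp hx with rfl | hx
            · exact ⟨by simp, h⟩
            · obtain ⟨hx1, hx2⟩ := (hmem x).mp hx
              exact ⟨by simp [hx1], lt_trans h hx2⟩
          · rintro ⟨hx1, hx2⟩
            rcases List.mem_cons.mp hx1 with rfl | hx1
            · simp
            · by_cases hxy : y < x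
              · exact List.mem_cons_of_mem _ ((hmem x).mpr ⟨hx1, hxy⟩)
              · have : x = y := le_antisymm (not_lt.mp hxy) (hs.1 x hx1)
                simp [this]
      · rw [if_neg h]
        obtain ⟨hpw, hmem⟩ := ih a hs.2
        refine ⟨hpw, ?_⟩
        intro x
        rw [hmem x]
        constructor
        · rintro ⟨h1, h2⟩; exact ⟨List.mem_cons_of_mem _ h1, h2⟩
        · rintro ⟨h1, h2⟩
          rcases List.mem_cons.mp h1 with rfl | h1
          · omega
          · exact ⟨h1, h2⟩

-- two strictly increasing lists with the same members are equal
theorem pvStrictExt : ∀ (xs ys : List Int), xs.Pairwise (· < ·) → ys.Pairwise (· < ·) →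
    (∀ a, a ∈ xs ↔ a ∈ ys) → xs = ys := by
  intro xs
  induction xs with
  | nil =>
      intro ys _ _ hm
      cases ys with
      | nil => rfl
      | cons y ys => exact absurd ((hm y).mpr (by simp)) (by simp)
  | cons x xs ih =>
      intro ys hx hy hm
      cases ys with
      | nil => exact absurd ((hm x).mp (by simp)) (by simp)
      | cons y ys =>
          rw [List.pairwise_cons] at hx hy
          have hxy : x = y := by
            have h1 : x ∈ y :: ys := (hm x).mp (by simp)
            have h2 : y ∈ x :: xs := (hm y).mpr (by simp)
            rcases List.mem_cons.mp h1 with h1 | h1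
            · exact h1
            · rcases List.mem_cons.mp h2 with h2 | h2
              · exact h2.symm
              · exact absurd (hy.1 x h1) (not_lt.mpr (le_of_lt (hx.1 y h2)))
          subst hxy
          have : xs = ys := by
            apply ih ys hx.2 hy.2
            intro a
            constructor
            · intro ha
              rcases List.mem_cons.mp ((hm a).mp (List.mem_cons_of_mem _ ha)) with rfl | h
              · exact absurd (hx.1 a ha) (lt_irrefl a)
              · exact h
            · intro ha
              rcases List.mem_cons.mp ((hm a).mpr (List.mem_cons_of_mem _ ha)) with rfl | h
              · exact absurd (hy.1 a ha) (lt_irrefl a)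
              · exact h
          rw [this]

-- one loop step of A equals one loop step of B, preserving the invariant
theorem pvStep_eq (l : List Int) (p top : Int) (h : pvInv l) :
    pvDedupScanA 0 (PySem.List.sorted (pvInnerA p top l l) (fun x => x) false)
      = (if p ≤ 0 then l else pvMergeD l (pvProdsB p top l)) ∧
    pvInv (if p ≤ 0 then l else pvMergeD l (pvProdsB p top l)) := by
  obtain ⟨hpw, hpos⟩ := h
  set m := pvInnerA p top l l with hm
  have hml : m = l ++ pvProdsB p top l := pvInnerA_eq p top l l
  have hsp : (PySem.List.sorted m (fun x => x) false).Pairwise (· ≤ ·) := by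
    simpa using PySem.List.sorted_pairwise (xs := m) (key := fun x => x)
  obtain ⟨hdp, hdm⟩ := pvDedupScanA_spec _ 0 hsp
  have hmem : ∀ x, x ∈ pvDedupScanA 0 (PySem.List.sorted m (fun x => x) false) ↔
      (x ∈ l ∨ x ∈ pvProdsB p top l) ∧ 0 < x := by
    intro x
    rw [hdm x, PySem.List.mem_sorted, hml]
    simp
  by_cases hp : p ≤ 0
  · rw [if_pos hp]
    refine ⟨?_, hpw, hpos⟩
    apply pvStrictExt _ _ hdp hpw
    intro a
    rw [hmem a]
    constructor
    · rintro ⟨h1 | h1, h2⟩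
      · exact h1
      · obtain ⟨v, hv, rfl⟩ := pvProdsB_mem h1
        exact absurd h2 (not_lt.mpr (mul_nonpos_of_nonneg_of_nonpos (le_of_lt (hpos v hv)) hp))
    · intro ha
      exact ⟨Or.inl ha, hpos a ha⟩
  · rw [if_neg hp]
    have hp' : 0 < p := by omega
    have hprodpw := pvProdsB_pairwise (top := top) hp' hpw
    have hmg := pvMergeD_pairwise l (pvProdsB p top l) hpw hprodpw
    have hmgpos : ∀ x ∈ pvMergeD l (pvProdsB p top l), 0 < x := by
      intro x hx
      rcases (pvMergeD_mem _ _ _).mp hx with h1 | h1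
      · exact hpos x h1
      · obtain ⟨v, hv, rfl⟩ := pvProdsB_mem h1
        exact mul_pos (hpos v hv) hp'
    refine ⟨?_, hmg, hmgpos⟩
    apply pvStrictExt _ _ hdp hmg
    intro a
    rw [hmem a, pvMergeD_mem]
    constructor
    · rintro ⟨h1, _⟩; exact h1
    · intro h1
      refine ⟨h1, ?_⟩
      rcases h1 with h1 | h1
      · exact hpos a h1
      · obtain ⟨v, hv, rfl⟩ := pvProdsB_mem h1
        exact mul_pos (hpos v hv) hp'

theorem pvFold_eq (top : Int) : ∀ (factors : List Int) (l : List Int), pvInv l →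
    factors.foldl (fun l p =>
      let l2 := pvInnerA p top l l
      let l3 := PySem.List.sorted l2 (fun x => x) false
      pvDedupScanA 0 l3) l
    = factors.foldl (fun l p => if p ≤ 0 then l else pvMergeD l (pvProdsB p top l)) l := by
  intro factors
  induction factors with
  | nil => intro l _; rfl
  | cons p rest ih =>
      intro l h
      obtain ⟨heq, hinv⟩ := pvStep_eq l p top h
      simp only [List.foldl_cons]
      rw [heq]
      exact ih _ hinv

-- ===== VERDICT (by name: the statement is the Claim_ definition above) =====
theorem gensubproducts_spec : Claim_equal_gensubproducts := by
  intro factors top _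
  unfold Spec_gensubproducts gensubproducts gensubproducts_alt
  exact pvFold_eq top factors [1] ⟨by simp, by intro x hx; simp at hx; omega⟩
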